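-- pv_equiv track=rewrite | github.com/parksangjun1196/Algorithm | 프로그래머스/lv2/42586. 기능개발/기능개발.py | solution
-- ===== SOURCE A (Python) =====
-- def solution(progresses, speeds):
--     rst = []
--     while len(progresses) != 0:
--         cnt = 0
--
--         while progresses[0] >=100:
--             if len(progresses) <= 0:
--                 rst.append(1)
--                 return rst
--
--             progresses.pop(0)
--             speeds.pop(0)
--             cnt +=1
--             if len(progresses) <= 0:
--                 rst.append(cnt)
--                 return rst
--         progresses = [progresses[i] + speeds[i] for i in range(len(progresses))]
--         if (cnt != 0):
--             rst.append(cnt)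
--     return rst
-- ===== SOURCE B (Python) =====
-- def solution(progresses, speeds):
--     # Closed-form: ceil finish-day per task, one pass grouping by the running max day.
--     # (Unlike A, does not mutate its arguments; return value is the same.)
--     pairs = list(zip(progresses, speeds))
--     if not pairs:
--         return []
--     rst = []
--     p, s = pairs[0]
--     cur = 0 if p >= 100 else -((p - 100) // s)
--     cnt = 1
--     for p, s in pairs[1:]:
--         d = 0 if p >= 100 else -((p - 100) // s)
--         if d > cur:
--             rst.append(cnt)
--             cur, cnt = d, 1
--         else:
--             cnt += 1
--     rst.append(cnt)
--     return rst
-- ===== Notes on version B (the rewrite author's own statement) =====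
-- stated objective: alternative
-- what changed: Replaces A's day-by-day simulation (incrementing every remaining task each day and popping finished front tasks) by a closed-form ceiling-division finish day per task and a single pass that groups tasks by the running maximum finish day.
-- outside the precondition, e.g. on solution([100], [-1]): A returns [1], B returns [1]
import Mathlib
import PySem

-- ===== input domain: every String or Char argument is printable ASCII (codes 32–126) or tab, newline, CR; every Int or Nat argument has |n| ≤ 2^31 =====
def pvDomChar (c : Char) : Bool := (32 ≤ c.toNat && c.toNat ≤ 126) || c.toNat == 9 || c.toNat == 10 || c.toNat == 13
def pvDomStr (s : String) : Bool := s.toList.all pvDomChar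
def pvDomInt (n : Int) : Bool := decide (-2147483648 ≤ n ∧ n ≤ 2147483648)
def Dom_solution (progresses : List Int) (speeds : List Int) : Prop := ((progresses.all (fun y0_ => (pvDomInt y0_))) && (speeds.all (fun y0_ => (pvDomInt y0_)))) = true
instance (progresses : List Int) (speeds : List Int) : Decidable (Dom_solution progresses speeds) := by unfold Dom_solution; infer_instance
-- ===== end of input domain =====

-- B replaces A's day-by-day simulation (re-incrementing every task each day) by a closed-form
-- ceiling-division finish day per task and one grouping pass; return values agree on Pre_.
-- A pops from its argument lists in place; the equivalence proved here is about the return value only.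

-- B replaces A's day-by-day simulation (re-incrementing every remaining task each day) by a
-- closed-form ceiling-division finish day per task and one grouping pass over the running max.
-- A pops from its argument lists in place; the equivalence proved is about the return value only.

-- ===== PORT A =====
-- inner `while progresses[0] >= 100` loop: pops the front of both lists, counting;
-- `.inl rst` models the early `return rst` (list emptied), `.inr` falling out of the loop.
-- (`ss.tail` is Python's `speeds.pop(0)`, exact whenever speeds is nonempty, which
-- Pre_solution guarantees; the `[]` case of progresses is unreachable from the call site.)
def solutionInner (ps ss : List Int) (cnt : Int) (rst : List Int) :
    List Int ⊕ (Int × List Int × List Int) :=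
  match ps with
  | [] => .inr (cnt, [], ss)
  | p :: rest =>
    if 100 ≤ p then
      -- Python's dead `if len(progresses) <= 0: rst.append(1); return rst` cannot fire here
      let ps' := rest
      let ss' := ss.tail
      let cnt' := cnt + 1
      if ps'.length ≤ 0 then .inl (rst ++ [cnt'])
      else solutionInner ps' ss' cnt' rst
    else .inr (cnt, ps, ss)

-- outer `while len(progresses) != 0` loop; `fuel` is only a totality guard (Python's loop
-- need not terminate, e.g. with zero speeds); Pre_solution makes the initial fuel sufficient.
def solutionOuter (fuel : Nat) (ps ss : List Int) (rst : List Int) : List Int :=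
  match fuel with
  | 0 => rst
  | fuel + 1 =>
    if ps.length ≠ 0 then
      match solutionInner ps ss 0 rst with
      | .inl rstEarly => rstEarly
      | .inr (cnt, ps', ss') =>
        -- progresses = [progresses[i] + speeds[i] for i in range(len(progresses))]
        -- (indices are in range under Pre_solution, so getD is exact)
        let ps'' := (List.range ps'.length).map (fun i => ps'.getD i 0 + ss'.getD i 0)
        let rst' := if cnt ≠ 0 then rst ++ [cnt] else rst
        solutionOuter fuel ps'' ss' rst'
    else rst

def solution (progresses : List Int) (speeds : List Int) : List Int :=
  solutionOuter (progresses.length + (progresses.map (fun p => (100 - p).toNat)).sum + 2)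
    progresses speeds []

-- ===== PORT B =====
-- finish day of one task: 0 if already done, else ceil((100-p)/s) = -((p-100)//s)
def finishDay (t : Int × Int) : Int :=
  if 100 ≤ t.1 then 0 else -(PySem.Int.floordiv (t.1 - 100) t.2)

-- the `for p, s in pairs[1:]` loop: cur = finish day of the open release group, cnt its size,
-- rst the groups already emitted; the final `rst.append(cnt)` is the `[]` case.
def solutionGo (rst : List Int) (cur cnt : Int) (ts : List (Int × Int)) : List Int :=
  match ts with
  | [] => rst ++ [cnt]
  | t :: ts =>
    let d := finishDay t
    if cur < d then solutionGo (rst ++ [cnt]) d 1 ts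
    else solutionGo rst cur (cnt + 1) ts

def solution_alt (progresses : List Int) (speeds : List Int) : List Int :=
  match progresses.zip speeds with
  | [] => []
  | t :: ts => solutionGo [] (finishDay t) 1 ts

-- ===== PRECONDITION & SPEC =====
-- Pre_ excludes inputs whose speeds list is shorter than progresses (A pops/indexes past its
-- end: IndexError) and inputs pairing a non-positive speed with an unfinished-or-overtaken
-- task, on which A's day loop may never terminate.
def Pre_solution (progresses : List Int) (speeds : List Int) : Prop :=
  progresses.length ≤ speeds.length ∧
    ∀ t ∈ progresses.zip speeds, 0 ≤ t.2 ∧ (0 < t.2 ∨ 100 ≤ t.1)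
instance (progresses : List Int) (speeds : List Int) : Decidable (Pre_solution progresses speeds) := by
  unfold Pre_solution; infer_instance
def pvWitness_solution : List Int × List Int := ([93, 30, 55], [1, 30, 5])
def Spec_solution (progresses : List Int) (speeds : List Int) (out : List Int) : Prop := out = solution_alt progresses speeds
instance (progresses : List Int) (speeds : List Int) (out : List Int) : Decidable (Spec_solution progresses speeds out) := by unfold Spec_solution; infer_instance

-- ===== CLAIM (what is proved, stated in full; the proofs are below) =====
def Claim_equal_solution : Prop := ∀ (progresses : List Int) (speeds : List Int), Dom_solution progresses speeds → Pre_solution progresses speeds → Spec_solution progresses speeds (solution progresses speeds)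

-- ===== LEMMAS AND PROOFS =====

-- B's grouping of a list of (progress, speed) pairs, starting a fresh group
def altPairs (L : List (Int × Int)) : List Int :=
  match L with
  | [] => []
  | t :: ts => solutionGo [] (finishDay t) 1 ts

-- every task has a nonnegative speed and is either moving or already finished
def Good (L : List (Int × Int)) : Prop := ∀ t ∈ L, 0 ≤ t.2 ∧ (0 < t.2 ∨ 100 ≤ t.1)

-- one day's increment on the remaining tasks
def shift (L : List (Int × Int)) : List (Int × Int) := L.map (fun t => (t.1 + t.2, t.2))

-- termination measure for A's outer loop: tasks left plus days left
def measureL (L : List (Int × Int)) : Nat :=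
  L.length + (L.map (fun t => (finishDay t).toNat)).sum

theorem finishDay_nonneg (t : Int × Int) (h : 0 ≤ t.2 ∧ (0 < t.2 ∨ 100 ≤ t.1)) :
    0 ≤ finishDay t := by
  obtain ⟨p, s⟩ := t
  dsimp only [finishDay] at *
  split_ifs with hp
  · omega
  · have hs : 0 < s := by rcases h.2 with hs | hs; exact hs; omega
    have := (PySem.Int.floordiv_lt_iff_lt_mul (a := p - 100) (q := 1) hs).2 (by nlinarith)
    omega

theorem finishDay_pos (t : Int × Int) (hs : 0 < t.2) (hp : t.1 < 100) :
    1 ≤ finishDay t := by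
  obtain ⟨p, s⟩ := t
  dsimp only [finishDay] at *
  rw [if_neg (by omega)]
  have := (PySem.Int.floordiv_lt_iff_lt_mul (a := p - 100) (q := 0) hs).2 (by nlinarith)
  omega

theorem finishDay_shift (t : Int × Int) (h : 0 ≤ t.2 ∧ (0 < t.2 ∨ 100 ≤ t.1)) :
    finishDay (t.1 + t.2, t.2) = max (finishDay t - 1) 0 := by
  obtain ⟨p, s⟩ := t
  by_cases hp : 100 ≤ p
  · have hs : 0 ≤ s := h.1
    dsimp only [finishDay]
    rw [if_pos (show (100:Int) ≤ (p,s).1 by exact hp), if_pos (by omega)]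
    omega
  · have hs : 0 < s := by rcases h.2 with hs | hs; exact hs; simp at hp hs; omega
    have hf1 : 1 ≤ finishDay (p, s) := finishDay_pos _ hs (by dsimp only; omega)
    dsimp only [finishDay] at hf1 ⊢
    rw [if_neg hp] at hf1
    by_cases hps : 100 ≤ p + s
    · have hle : -PySem.Int.floordiv (p - 100) s ≤ 1 := by
        have := (PySem.Int.le_floordiv_iff_mul_le (a := p - 100) (q := -1) hs).2 (by nlinarith)
        omega
      rw [if_pos (show (100:Int) ≤ (p + s, s).1 from hps), if_neg hp]
      dsimp only at *
      omega
    · have key : PySem.Int.floordiv (p + s - 100) s = PySem.Int.floordiv (p - 100) s + 1 := by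
        have := Int.add_mul_fdiv_right (p - 100) 1 (show s ≠ 0 by omega)
        simpa [PySem.Int.floordiv, one_mul, show p - 100 + s = p + s - 100 by ring] using this
      rw [if_neg (show ¬ (100:Int) ≤ (p + s, s).1 from hps), if_neg hp]
      dsimp only at *
      omega

theorem good_shift (L : List (Int × Int)) (h : Good L) : Good (shift L) := by
  intro t ht
  simp only [shift, List.mem_map] at ht
  obtain ⟨u, hu, rfl⟩ := ht
  obtain ⟨h1, h2⟩ := h u hu
  constructor
  · exact h1
  · rcases h2 with h2 | h2
    · exact Or.inl h2
    · exact Or.inr (by dsimp only; omega)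

theorem go_append (r1 r2 : List Int) (cur cnt : Int) (ts : List (Int × Int)) :
    solutionGo (r1 ++ r2) cur cnt ts = r1 ++ solutionGo r2 cur cnt ts := by
  induction ts generalizing r2 cur cnt with
  | nil => simp [solutionGo]
  | cons t ts ih =>
    simp only [solutionGo]
    split_ifs with h
    · rw [List.append_assoc, ih]
    · exact ih r2 cur (cnt + 1)

theorem go_shift (ts : List (Int × Int)) (cur cnt : Int) (rst : List Int)
    (hg : Good ts) (hc : 1 ≤ cur) :
    solutionGo rst (cur - 1) cnt (shift ts) = solutionGo rst cur cnt ts := by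
  induction ts generalizing cur cnt rst with
  | nil => simp [shift, solutionGo]
  | cons t ts ih =>
    have hgt := hg t (by simp)
    have hgts : Good ts := fun u hu => hg u (by simp [hu])
    have hsh : finishDay (t.1 + t.2, t.2) = max (finishDay t - 1) 0 := finishDay_shift t hgt
    have hnn : 0 ≤ finishDay t := finishDay_nonneg t hgt
    simp only [shift, List.map_cons, solutionGo] at *
    rw [hsh]
    by_cases hlt : cur < finishDay t
    · rw [if_pos (by omega), if_pos hlt]
      have : max (finishDay t - 1) 0 = finishDay t - 1 := by omega
      rw [this]
      exact ih (finishDay t) 1 (rst ++ [cnt]) hgts (by omega)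
    · rw [if_neg (by omega), if_neg hlt]
      exact ih cur (cnt + 1) rst hgts hc

theorem go_pop (L0 : List (Int × Int)) (L1 : List (Int × Int)) (rst : List Int) (cnt : Int)
    (h0 : ∀ t ∈ L0, (100:Int) ≤ t.1) (hg : Good L1)
    (h1 : ∀ t, L1.head? = some t → t.1 < 100) :
    solutionGo rst 0 cnt (L0 ++ L1) =
      match L1 with
      | [] => rst ++ [cnt + L0.length]
      | t :: ts => solutionGo (rst ++ [cnt + L0.length]) (finishDay t) 1 ts := by
  induction L0 generalizing cnt with
  | nil =>
    match L1 with
    | [] => simp [solutionGo]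
    | t :: ts =>
      have hp : t.1 < 100 := h1 t (by simp)
      have hs : 0 < t.2 := by rcases (hg t (by simp)).2 with h | h; exact h; omega
      have hf : 1 ≤ finishDay t := finishDay_pos t hs hp
      simp only [List.nil_append, solutionGo]
      rw [if_pos (by omega)]
      simp
  | cons t0 L0 ih =>
    have hf0 : finishDay t0 = 0 := by
      unfold finishDay; rw [if_pos (h0 t0 (by simp))]
    simp only [List.cons_append, solutionGo]
    rw [hf0, if_neg (by omega)]
    rw [ih (cnt + 1) (fun u hu => h0 u (by simp [hu]))]
    match L1 with
    | [] => simp; ring_nf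
    | t :: ts =>
      simp only [List.length_cons]
      have : cnt + 1 + (L0.length : Int) = cnt + ((L0.length : Int) + 1) := by ring
      rw [this]
      push_cast
      ring_nf

theorem inner_spec (L : List (Int × Int)) (E : List Int) (cnt : Int) (rst : List Int) :
    solutionInner (L.map Prod.fst) (L.map Prod.snd ++ E) cnt rst =
      (let L0 := L.takeWhile (fun t => decide (100 ≤ t.1))
       let L1 := L.dropWhile (fun t => decide (100 ≤ t.1))
       if L1.isEmpty ∧ ¬ L0.isEmpty then .inl (rst ++ [cnt + L0.length])
       else .inr (cnt + L0.length, L1.map Prod.fst, L1.map Prod.snd ++ E)) := by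
  induction L generalizing cnt with
  | nil => simp [solutionInner]
  | cons t L ih =>
    by_cases hp : (100:Int) ≤ t.1
    · rw [List.takeWhile_cons_of_pos (by simpa using hp),
        List.dropWhile_cons_of_pos (by simpa using hp)]
      simp only [List.map_cons, List.cons_append, solutionInner]
      rw [if_pos hp]
      simp only [List.tail_cons]
      match L with
      | [] => simp
      | u :: L' =>
        rw [if_neg (by simp)]
        rw [ih (cnt + 1)]
        simp only []
        by_cases h1 : ((u :: L').dropWhile (fun t => decide (100 ≤ t.1))).isEmpty = true ∧
            ¬ ((u :: L').takeWhile (fun t => decide (100 ≤ t.1))).isEmpty = true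
        · rw [if_pos h1, if_pos ⟨h1.1, by simp⟩]
          simp only [List.length_cons]
          push_cast
          ring_nf
        · rw [if_neg h1]
          by_cases hd : ((u :: L').dropWhile (fun t => decide (100 ≤ t.1))).isEmpty = true
          · -- then takeWhile must be nonempty is false only if h1 fails via second conj;
            -- takeWhile of (u::L') empty means u fails, but dropWhile empty means all pass:
            -- u::L' dropWhile empty → u passes → takeWhile nonempty → h1 holds, contradiction
            exfalso
            apply h1
            refine ⟨hd, ?_⟩
            have : (100:Int) ≤ u.1 := by
              by_contra hu
              rw [List.dropWhile_cons_of_neg (by simpa using hu)] at hd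
              simp at hd
            rw [List.takeWhile_cons_of_pos (by simpa using this)]
            simp
          · rw [if_neg (by intro hc; exact hd hc.1)]
            simp only [List.length_cons]
            push_cast
            ring_nf
    · rw [List.takeWhile_cons_of_neg (by simpa using hp),
        List.dropWhile_cons_of_neg (by simpa using hp)]
      simp only [List.map_cons, List.cons_append, solutionInner]
      rw [if_neg hp]
      simp

theorem measure_shift_le (L : List (Int × Int)) (hg : Good L) :
    measureL (shift L) ≤ measureL L := by
  induction L with
  | nil => simp [measureL, shift]
  | cons t L ih =>
    have h := hg t (by simp)
    have := finishDay_shift t h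
    have h0 := finishDay_nonneg t h
    simp only [measureL, shift, List.map_cons, List.length_cons, List.sum_cons] at *
    have hrec := ih (fun u hu => hg u (by simp [hu]))
    have : (finishDay (t.1 + t.2, t.2)).toNat ≤ (finishDay t).toNat := by omega
    omega

theorem measure_shift_lt (t : Int × Int) (ts : List (Int × Int)) (hg : Good (t :: ts))
    (hf : 1 ≤ finishDay t) : measureL (shift (t :: ts)) < measureL (t :: ts) := by
  have h := hg t (by simp)
  have hsh := finishDay_shift t h
  have hrec := measure_shift_le ts (fun u hu => hg u (by simp [hu]))
  simp only [measureL, shift, List.map_cons, List.length_cons, List.sum_cons] at *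
  have : (finishDay (t.1 + t.2, t.2)).toNat < (finishDay t).toNat := by omega
  omega

theorem measure_suffix_lt (L0 L1 : List (Int × Int)) (h : ¬ L0.isEmpty) :
    measureL L1 < measureL (L0 ++ L1) := by
  simp only [measureL, List.length_append, List.map_append, List.sum_append]
  have : 1 ≤ L0.length := by cases L0 <;> simp_all
  omega

theorem range_map_shift (L : List (Int × Int)) (E : List Int) :
    (List.range (L.map Prod.fst).length).map
        (fun i => (L.map Prod.fst).getD i 0 + (L.map Prod.snd ++ E).getD i 0) =
      (shift L).map Prod.fst := by
  induction L with
  | nil => simp [shift]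
  | cons t L ih =>
    simp only [shift, List.map_cons, List.length_cons, List.range_succ_eq_map, List.map_map,
      Function.comp_def, Nat.succ_eq_add_one, List.cons_append, List.getD_cons_succ,
      List.getD_cons_zero]
    refine congrArg₂ List.cons rfl ?_
    simpa [shift, Function.comp_def] using ih

-- head of dropWhile fails the predicate
theorem head_dropWhile {α : Type} (p : α → Bool) (l : List α) (t : α)
    (h : (l.dropWhile p).head? = some t) : p t = false := by
  induction l with
  | nil => simp [List.dropWhile] at h
  | cons x xs ih =>
    rw [List.dropWhile_cons] at h
    by_cases hx : p x = true
    · rw [if_pos hx] at h; exact ih h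
    · rw [if_neg hx] at h
      simp at h
      subst h
      simpa using hx

theorem outer_spec (fuel : Nat) (L : List (Int × Int)) (E : List Int) (rst : List Int)
    (hg : Good L) (hf : measureL L ≤ fuel) :
    solutionOuter fuel (L.map Prod.fst) (L.map Prod.snd ++ E) rst = rst ++ altPairs L := by
  induction fuel generalizing L E rst with
  | zero =>
    have : L = [] := by
      cases L with
      | nil => rfl
      | cons t ts => simp [measureL] at hf
    subst this
    simp [solutionOuter, altPairs]
  | succ fuel ih =>
    match L with
    | [] => simp [solutionOuter, altPairs]
    | t :: ts =>
      have hg' : Good (t :: ts) := hg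
      have hne : ((t :: ts).map Prod.fst).length ≠ 0 := by simp
      rw [solutionOuter, if_pos hne, inner_spec]
      set P : (Int × Int) → Bool := (fun t => decide (100 ≤ t.1)) with hP
      set L0 := (t :: ts).takeWhile P with hL0
      set L1 := (t :: ts).dropWhile P with hL1
      have hsplit : L0 ++ L1 = t :: ts := List.takeWhile_append_dropWhile
      have h0 : ∀ u ∈ L0, (100:Int) ≤ u.1 := by
        intro u hu
        have := List.mem_takeWhile_imp (l := t :: ts) (p := P) (by rw [← hL0]; exact hu)
        simpa [hP] using this
      have hgL1 : Good L1 := by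
        intro u hu
        exact hg' u (by rw [← hsplit]; exact List.mem_append_right _ hu)
      have h1 : ∀ u, L1.head? = some u → u.1 < 100 := by
        intro u hu
        have := head_dropWhile P (t :: ts) u (by rw [← hL1]; exact hu)
        simpa [hP] using this
      by_cases hcase : L1.isEmpty = true ∧ ¬ L0.isEmpty = true
      · rw [if_pos hcase]
        dsimp only
        -- early return: every task pops; rst ++ [|L0|] and altPairs (t::ts) = [|t::ts|]
        have hL1e : L1 = [] := by simpa using hcase.1
        have hLL0 : L0 = t :: ts := by rw [← hsplit, hL1e, List.append_nil]
        have hft : finishDay t = 0 := by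
          unfold finishDay
          rw [if_pos (h0 t (by rw [hLL0]; simp))]
        have hgo : solutionGo [] (0:Int) 1 ts = [1 + (ts.length : Int)] := by
          have h0ts : ∀ u ∈ ts, (100:Int) ≤ u.1 := by
            intro u hu; exact h0 u (by rw [hLL0]; simp [hu])
          have := go_pop ts [] [] 1 h0ts (by intro u hu; simp at hu)
            (by intro u hu; simp at hu)
          simpa using this
        simp only [altPairs, hft, hgo]
        have : (L0.length : Int) = 1 + (ts.length : Int) := by
          rw [hLL0]; simp; ring
        simp [this]
      · rw [if_neg hcase]
        dsimp only
        rw [range_map_shift L1 E]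
        have hgs : Good (shift L1) := good_shift L1 hgL1
        have hsnd : (shift L1).map Prod.snd = L1.map Prod.snd := by
          simp [shift, List.map_map]
        rw [← hsnd]
        by_cases hc0 : L0.isEmpty = true
        · -- no pops this day: L0 = [], L1 = t :: ts, cnt = 0
          have hL0e : L0 = [] := by simpa using hc0
          have hL1L : L1 = t :: ts := by rw [← hsplit, hL0e, List.nil_append]
          have htlt : t.1 < 100 := h1 t (by rw [hL1L]; simp)
          have hts : 0 < t.2 := by
            rcases (hg' t (by simp)).2 with h | h; exact h; omega
          have hftpos : 1 ≤ finishDay t := finishDay_pos t hts htlt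
          have hdec : measureL (shift L1) ≤ fuel := by
            have := measure_shift_lt t ts hg' hftpos
            rw [hL1L]
            omega
          rw [if_neg (by rw [hL0e]; simp)]
          rw [ih (shift L1) E rst hgs hdec]
          -- altPairs (shift (t :: ts)) = altPairs (t :: ts)
          rw [hL1L]
          simp only [altPairs, shift, List.map_cons]
          have hsh := finishDay_shift t (hg' t (by simp))
          have heq : finishDay (t.1 + t.2, t.2) = finishDay t - 1 := by omega
          rw [heq]
          rw [show (ts.map (fun t => (t.1 + t.2, t.2)) : List (Int × Int)) = shift ts from rfl]
          rw [go_shift ts (finishDay t) 1 [] (fun u hu => hg' u (by simp [hu])) hftpos]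
        · -- L0 ≠ []: a release group of |L0| tasks closes today
          have hL0ne : ¬ L0.isEmpty = true := hc0
          have hcnt : ((0:Int) + (L0.length : Int)) ≠ 0 := by
            cases hL0' : L0 with
            | nil => rw [hL0'] at hL0ne; simp at hL0ne
            | cons a as => simp; omega
          rw [if_pos hcnt]
          have hdec : measureL (shift L1) ≤ fuel := by
            have h1' := measure_shift_le L1 hgL1
            have h2' := measure_suffix_lt L0 L1 hL0ne
            rw [hsplit] at h2'
            omega
          rw [ih (shift L1) E (rst ++ [0 + (L0.length : Int)]) hgs hdec]
          have hft : finishDay t = 0 := by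
            have ht0 : t ∈ L0 := by
              have hh := congrArg List.head? hsplit
              cases hL0' : L0 with
              | nil => rw [hL0'] at hL0ne; simp at hL0ne
              | cons a as =>
                rw [hL0'] at hh
                simp only [List.cons_append, List.head?_cons, Option.some.injEq] at hh
                simp [hh]
            unfold finishDay
            rw [if_pos (h0 t ht0)]
          match hL1' : L1 with
          | [] => exact absurd ⟨by simp, hL0ne⟩ hcase
          | t1 :: ts1 =>
            have ht1lt : t1.1 < 100 := h1 t1 (by simp)
            have ht1s : 0 < t1.2 := by
              rcases (hgL1 t1 (by simp)).2 with h | h; exact h; omega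
            have hft1 : 1 ≤ finishDay t1 := finishDay_pos t1 ht1s ht1lt
            -- LHS tail: altPairs of the shifted remainder
            simp only [altPairs, shift, List.map_cons]
            have hsh1 := finishDay_shift t1 (hgL1 t1 (by simp))
            have heq1 : finishDay (t1.1 + t1.2, t1.2) = finishDay t1 - 1 := by omega
            rw [heq1]
            rw [show (ts1.map (fun t => (t.1 + t.2, t.2)) : List (Int × Int)) = shift ts1 from rfl]
            rw [go_shift ts1 (finishDay t1) 1 []
              (fun u hu => hgL1 u (by simp [hu])) hft1]
            -- RHS: altPairs (t :: ts) via go_pop along ts = L0.tail ++ L1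
            have hgoL : solutionGo [] (finishDay t) 1 ts =
                [1 + ((L0.tail).length : Int)] ++ solutionGo [] (finishDay t1) 1 ts1 := by
              have hts_eq : ts = L0.tail ++ (t1 :: ts1) := by
                cases hL0'' : L0 with
                | nil => rw [hL0''] at hL0ne; simp at hL0ne
                | cons a as =>
                  have h' := hsplit
                  rw [hL0''] at h'
                  simp at h'
                  simp [h'.2.symm]
              have h0tail : ∀ u ∈ L0.tail, (100:Int) ≤ u.1 := by
                intro u hu; exact h0 u (List.mem_of_mem_tail hu)
              have hp := go_pop L0.tail (t1 :: ts1) [] 1 h0tail hgL1 h1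
              rw [hft, hts_eq, hp]
              dsimp only
              rw [show ([] ++ [1 + ((L0.tail).length : Int)] : List Int) =
                    [1 + ((L0.tail).length : Int)] ++ ([] : List Int) by simp]
              rw [go_append]
            rw [hgoL]
            have hlen : (0:Int) + (L0.length : Int) = 1 + ((L0.tail).length : Int) := by
              cases hL0'' : L0 with
              | nil => rw [hL0''] at hL0ne; simp at hL0ne
              | cons a as => simp; ring
            rw [hlen]
            simp

theorem finishDay_le (t : Int × Int) (h : 0 ≤ t.2 ∧ (0 < t.2 ∨ 100 ≤ t.1)) :
    (finishDay t).toNat ≤ (100 - t.1).toNat := by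
  obtain ⟨p, s⟩ := t
  dsimp only [finishDay] at *
  split_ifs with hp
  · simp
  · have hs : 0 < s := by rcases h.2 with h' | h'; exact h'; omega
    have := (PySem.Int.le_floordiv_iff_mul_le (a := p - 100) (q := p - 100) hs).2 (by nlinarith)
    omega

theorem measure_bound (ps ss : List Int) (hg : Good (ps.zip ss)) :
    measureL (ps.zip ss) ≤ ps.length + (ps.map (fun p => (100 - p).toNat)).sum := by
  induction ps generalizing ss with
  | nil => simp [measureL]
  | cons p ps ih =>
    cases ss with
    | nil => simp [measureL]
    | cons s ss =>
      have h := hg (p, s) (by simp [List.zip_cons_cons])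
      have hle : (finishDay (p, s)).toNat ≤ ((100:Int) - p).toNat := finishDay_le (p, s) h
      have hrec := ih ss (fun u hu => hg u (by simp [List.zip_cons_cons, hu]))
      simp only [List.zip_cons_cons, measureL, List.map_cons, List.sum_cons,
        List.length_cons] at *
      omega

theorem snd_zip_append (ps ss : List Int) (h : ps.length ≤ ss.length) :
    (ps.zip ss).map Prod.snd ++ ss.drop ps.length = ss := by
  induction ps generalizing ss with
  | nil => simp
  | cons p ps ih =>
    cases ss with
    | nil => simp at h
    | cons s ss => simp [List.zip_cons_cons, ih ss (by simpa using h)]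

theorem solution_eq_alt (ps ss : List Int)
    (hlen : ps.length ≤ ss.length)
    (hgood : ∀ t ∈ ps.zip ss, 0 ≤ t.2 ∧ (0 < t.2 ∨ 100 ≤ t.1)) :
    solution ps ss = solution_alt ps ss := by
  have hfst : (ps.zip ss).map Prod.fst = ps := List.map_fst_zip hlen
  have hsnd : (ps.zip ss).map Prod.snd ++ ss.drop ps.length = ss := snd_zip_append ps ss hlen
  have hfuel : measureL (ps.zip ss) ≤
      ps.length + (ps.map (fun p => (100 - p).toNat)).sum + 2 := by
    have := measure_bound ps ss hgood
    omega
  have H := outer_spec (ps.length + (ps.map (fun p => (100 - p).toNat)).sum + 2)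
    (ps.zip ss) (ss.drop ps.length) [] hgood hfuel
  rw [hfst, hsnd, List.nil_append] at H
  unfold solution
  rw [H]
  unfold solution_alt altPairs
  rfl

-- ===== VERDICT (by name: the statement is the Claim_ definition above) =====
theorem solution_spec : Claim_equal_solution := by
  intro ps ss _hdom hpre
  unfold Pre_solution at hpre
  unfold Spec_solution
  exact solution_eq_alt ps ss hpre.1 hpre.2
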